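-- pv_equiv track=rewrite | github.com/gkamtzir/Kattis-Problems | warehouse.py | sort_equal_quantities_alphabetically
-- ===== SOURCE A (Python) =====
-- import operator
--
-- def sort_equal_quantities_alphabetically(warehouse):
--     warehouse = sorted(warehouse.items(), key = operator.itemgetter(1), reverse = True)
--     start = 0
--     count = 1
--     quantity = warehouse[0][1]
--     for i in range(1, len(warehouse)):
--         if quantity == warehouse[i][1]:
--             count += 1
--         else:
--             if count > 1:
--                 warehouse[start:i] = sorted(warehouse[start:i], key = operator.itemgetter(0))
--             start = i
--             count = 1
--             quantity = warehouse[i][1]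
--     if count > 1:
--         warehouse[start:] = sorted(warehouse[start:], key = operator.itemgetter(0))
--     return warehouse
-- ===== SOURCE B (Python) =====
-- def sort_equal_quantities_alphabetically(warehouse):
--     return sorted(warehouse.items(), key=lambda item: (-item[1], item[0]))
-- ===== Notes on version B (the rewrite author's own statement) =====
-- stated objective: simpler
-- what changed: Replaces A's two-phase scheme (stable sort by quantity descending, then a scan that detects equal-quantity runs and re-sorts each run by name) with one sorted() call on the composite key (-quantity, name).
import Mathlib
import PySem

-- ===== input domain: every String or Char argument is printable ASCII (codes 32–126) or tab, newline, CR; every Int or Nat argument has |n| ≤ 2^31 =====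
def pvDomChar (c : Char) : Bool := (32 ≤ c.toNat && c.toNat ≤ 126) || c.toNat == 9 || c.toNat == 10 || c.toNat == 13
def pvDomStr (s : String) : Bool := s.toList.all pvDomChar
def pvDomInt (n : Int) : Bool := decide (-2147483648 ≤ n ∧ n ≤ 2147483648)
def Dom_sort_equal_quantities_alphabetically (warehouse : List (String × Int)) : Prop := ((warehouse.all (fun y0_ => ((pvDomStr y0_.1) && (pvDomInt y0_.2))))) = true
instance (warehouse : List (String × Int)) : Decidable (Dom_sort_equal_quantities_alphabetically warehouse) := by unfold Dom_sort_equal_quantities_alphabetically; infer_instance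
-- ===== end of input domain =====

-- B replaces A's two-phase sort (stable quantity-descending sort + run-detection loop re-sorting
-- equal-quantity runs by name) with a single composite-key sort; objective: simpler.

-- ===== PORT A =====
-- hand port of the slice assignment `ws[a:b] = xs`; exact for 0 ≤ a ≤ b ≤ len ws (the only case A's loop reaches)
def pvSetSliceA (ws : List (String × Int)) (a b : Int) (xs : List (String × Int)) : List (String × Int) :=
  PySem.List.slice ws none (some a) ++ xs ++ PySem.List.slice ws (some b) none

-- one iteration of A's for-loop; state = (warehouse, start, count, quantity)
def pvStepA (s : List (String × Int) × Int × Int × Int) (i : Int) : List (String × Int) × Int × Int × Int :=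
  let wi := PySem.List.pyGetD s.1 i ("", 0)
  if s.2.2.2 = wi.2 then
    (s.1, s.2.1, s.2.2.1 + 1, s.2.2.2)
  else
    let ws' := if 1 < s.2.2.1 then
        pvSetSliceA s.1 s.2.1 i
          (PySem.List.sorted (PySem.List.slice s.1 (some s.2.1) (some i)) (fun x => x.1) false)
      else s.1
    (ws', i, 1, wi.2)

-- the trailing `if count > 1: warehouse[start:] = sorted(...)` plus `return warehouse`
def pvFinishA (s : List (String × Int) × Int × Int × Int) : List (String × Int) :=
  if 1 < s.2.2.1 then
    PySem.List.slice s.1 none (some s.2.1)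
      ++ PySem.List.sorted (PySem.List.slice s.1 (some s.2.1) none) (fun x => x.1) false
  else s.1

def sort_equal_quantities_alphabetically (warehouse : List (String × Int)) : List (String × Int) :=
  let ws0 := PySem.List.sorted warehouse (fun x => x.2) true
  match PySem.List.pyGet? ws0 0 with
  | none => []  -- Python raises IndexError here (empty dict); excluded by Pre_
  | some w0 =>
    pvFinishA ((PySem.List.pyRange 1 (PySem.List.len ws0) 1).foldl pvStepA (ws0, 0, 1, w0.2))

-- ===== PORT B =====
def sort_equal_quantities_alphabetically_alt (warehouse : List (String × Int)) : List (String × Int) :=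
  PySem.List.sorted2 warehouse (fun x => -x.2) (fun x => x.1) false

-- ===== PRECONDITION & SPEC =====
-- Pre_ requires a nonempty input (on the empty dict A raises IndexError — see Raises_ below) and
-- distinct keys, which every Python dict (the declared input type dict[str, int]) guarantees, so no
-- actual dict input is excluded by the Nodup conjunct.
def Pre_sort_equal_quantities_alphabetically (warehouse : List (String × Int)) : Prop :=
  warehouse ≠ [] ∧ (warehouse.map Prod.fst).Nodup
instance (warehouse : List (String × Int)) : Decidable (Pre_sort_equal_quantities_alphabetically warehouse) := by unfold Pre_sort_equal_quantities_alphabetically; infer_instance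

def pvWitness_sort_equal_quantities_alphabetically : (List (String × Int)) :=
  [("pear", 2), ("apple", 2), ("fig", 5)]

def Spec_sort_equal_quantities_alphabetically (warehouse : List (String × Int)) (out : List (String × Int)) : Prop := out = sort_equal_quantities_alphabetically_alt warehouse
instance (warehouse : List (String × Int)) (out : List (String × Int)) : Decidable (Spec_sort_equal_quantities_alphabetically warehouse out) := by unfold Spec_sort_equal_quantities_alphabetically; infer_instance

-- ===== CLAIM (what is proved, stated in full; the proofs are below) =====
def Claim_equal_sort_equal_quantities_alphabetically : Prop := ∀ (warehouse : List (String × Int)), Dom_sort_equal_quantities_alphabetically warehouse → Pre_sort_equal_quantities_alphabetically warehouse → Spec_sort_equal_quantities_alphabetically warehouse (sort_equal_quantities_alphabetically warehouse)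

-- ===== LEMMAS AND PROOFS =====

-- the composite key of B, as one lexicographic key
def pvLexKey (x : String × Int) : Int ×ₗ String := toLex (-x.2, x.1)

-- the intended result, computed run by run over the quantity-sorted list:
-- R = current (nonempty) run, all of quantity q; T = the rest
def pvSpecFrom (R : List (String × Int)) (q : Int) : List (String × Int) → List (String × Int)
  | [] => PySem.List.sorted R (fun x => x.1) false
  | x :: t =>
    if x.2 = q then pvSpecFrom (R ++ [x]) q t
    else PySem.List.sorted R (fun x => x.1) false ++ pvSpecFrom [x] x.2 t

theorem pvSorted_singleton (a : String × Int) (k : (String × Int) → String) :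
    PySem.List.sorted [a] k false = [a] := by
  rw [PySem.List.sorted_eq_foldl_insertBy]; simp [PySem.List.insertBy]

theorem pvGetD_mid (A B : List (String × Int)) (x : String × Int) (d : String × Int) :
    PySem.List.pyGetD (A ++ x :: B) ((A.length : Nat) : Int) d = x := by
  rw [PySem.List.pyGetD_natCast]
  simp [List.getD]

theorem pvLoopA (T : List (String × Int)) : ∀ (P R : List (String × Int)) (q : Int),
    R ≠ [] → (∀ x ∈ R, x.2 = q) →
    pvFinishA ((PySem.List.pyRange (((P.length + R.length : Nat) : Int))
        (((P.length + R.length + T.length : Nat) : Int)) 1).foldl pvStepA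
        (P ++ (R ++ T), (P.length : Int), (R.length : Int), q))
      = P ++ pvSpecFrom R q T := by
  induction T with
  | nil =>
    intro P R q hne hq
    rw [show ((P.length + R.length + ([] : List (String × Int)).length : Nat) : Int)
        = ((P.length + R.length : Nat) : Int) by simp]
    rw [PySem.List.pyRange_one_eq_nil le_rfl]
    simp only [List.foldl_nil, List.append_nil, pvFinishA, pvSpecFrom]
    by_cases hR : 1 < R.length
    · rw [if_pos (by exact_mod_cast hR)]
      rw [PySem.List.slice_to_natCast, PySem.List.slice_from_natCast]
      rw [List.take_left, List.drop_left]
    · rw [if_neg (by exact_mod_cast hR)]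
      obtain ⟨r, rfl⟩ : ∃ r, R = [r] := by
        match R, hne, hR with
        | [r], _, _ => exact ⟨r, rfl⟩
        | a :: b :: t, _, hR => exact absurd (by simp) hR
      rw [pvSorted_singleton]
  | cons x t ih =>
    intro P R q hne hq
    rw [PySem.List.pyRange_one_cons (by exact_mod_cast (by simp : P.length + R.length < P.length + R.length + (x :: t).length))]
    rw [List.foldl_cons]
    have hws : P ++ (R ++ x :: t) = (P ++ R) ++ x :: t := by simp
    have hget : PySem.List.pyGetD (P ++ (R ++ x :: t)) ((P.length + R.length : Nat) : Int) ("", 0) = x := by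
      rw [hws, show ((P.length + R.length : Nat) : Int) = (((P ++ R).length : Nat) : Int) by simp]
      exact pvGetD_mid _ _ _ _
    by_cases h : x.2 = q
    · -- run continues
      have hstep : pvStepA (P ++ (R ++ x :: t), (P.length : Int), (R.length : Int), q)
            ((P.length + R.length : Nat) : Int)
          = (P ++ ((R ++ [x]) ++ t), (P.length : Int), ((R ++ [x]).length : Int), q) := by
        simp only [pvStepA, hget, if_pos h.symm]
        simp
      rw [hstep]
      have h2 := ih P (R ++ [x]) q (by simp) (by
        intro y hy
        rcases List.mem_append.mp hy with hy | hy
        · exact hq y hy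
        · simp at hy; subst hy; exact h)
      have harith1 : ((P.length + R.length : Nat) : Int) + 1
          = ((P.length + (R ++ [x]).length : Nat) : Int) := by simp; omega
      have harith2 : ((P.length + R.length + (x :: t).length : Nat) : Int)
          = ((P.length + (R ++ [x]).length + t.length : Nat) : Int) := by simp; omega
      rw [harith1, harith2]
      rw [show pvSpecFrom R q (x :: t) = pvSpecFrom (R ++ [x]) q t by rw [pvSpecFrom, if_pos h]]
      exact h2
    · -- run boundary: flush
      have hxne : ¬ (q = x.2) := fun hc => h hc.symm
      have hflush : (if (1:Int) < (R.length : Int) then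
            pvSetSliceA (P ++ (R ++ x :: t)) (P.length : Int) ((P.length + R.length : Nat) : Int)
              (PySem.List.sorted (PySem.List.slice (P ++ (R ++ x :: t)) (some (P.length : Int))
                (some ((P.length + R.length : Nat) : Int))) (fun y => y.1) false)
          else P ++ (R ++ x :: t))
          = (P ++ PySem.List.sorted R (fun y => y.1) false) ++ ([x] ++ t) := by
        have e1 : (P ++ (R ++ x :: t)).drop P.length = R ++ x :: t := List.drop_left
        have e2 : (P ++ (R ++ x :: t)).take P.length = P := List.take_left
        have e3 : (P ++ (R ++ x :: t)).drop (P.length + R.length) = x :: t := by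
          rw [show P ++ (R ++ x :: t) = (P ++ R) ++ x :: t by simp]
          exact List.drop_left' (by simp)
        by_cases hR : 1 < R.length
        · rw [if_pos (by exact_mod_cast hR)]
          unfold pvSetSliceA
          rw [PySem.List.slice_natCast, PySem.List.slice_to_natCast, PySem.List.slice_from_natCast]
          rw [e1, e2, e3, Nat.add_sub_cancel_left, List.take_left' rfl]
          simp
        · rw [if_neg (by exact_mod_cast hR)]
          obtain ⟨r, rfl⟩ : ∃ r, R = [r] := by
            match R, hne, hR with
            | [r], _, _ => exact ⟨r, rfl⟩
            | a :: b :: t', _, hR => exact absurd (by simp) hR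
          rw [pvSorted_singleton]
          simp
      have hstep : pvStepA (P ++ (R ++ x :: t), (P.length : Int), (R.length : Int), q)
            ((P.length + R.length : Nat) : Int)
          = ((P ++ PySem.List.sorted R (fun y => y.1) false) ++ ([x] ++ t),
             ((P.length + R.length : Nat) : Int), 1, x.2) := by
        simp only [pvStepA, hget, if_neg hxne]
        rw [hflush]
      rw [hstep]
      have h2 := ih (P ++ PySem.List.sorted R (fun y => y.1) false) [x] x.2 (by simp) (by simp)
      have hlen : (PySem.List.sorted R (fun y => y.1) false).length = R.length := by
        exact (PySem.List.sorted_perm R (fun y => y.1) false).length_eq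
      have harith1 : ((P.length + R.length : Nat) : Int)
          = ((P ++ PySem.List.sorted R (fun y => y.1) false).length : Int) := by
        simp [hlen]
      have harith2 : ((P.length + R.length : Nat) : Int) + 1
          = (((P ++ PySem.List.sorted R (fun y => y.1) false).length + ([x] : List (String × Int)).length : Nat) : Int) := by
        simp [hlen]
      have harith3 : ((P.length + R.length + (x :: t).length : Nat) : Int)
          = (((P ++ PySem.List.sorted R (fun y => y.1) false).length + ([x] : List (String × Int)).length + t.length : Nat) : Int) := by
        simp [hlen]
        omega
      rw [show pvSpecFrom R q (x :: t)
          = PySem.List.sorted R (fun y => y.1) false ++ pvSpecFrom [x] x.2 t by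
        rw [pvSpecFrom, if_neg h]]
      calc pvFinishA ((PySem.List.pyRange (((P.length + R.length : Nat) : Int) + 1)
              ((P.length + R.length + (x :: t).length : Nat) : Int) 1).foldl pvStepA
              ((P ++ PySem.List.sorted R (fun y => y.1) false) ++ ([x] ++ t),
               ((P.length + R.length : Nat) : Int), 1, x.2))
          = (P ++ PySem.List.sorted R (fun y => y.1) false) ++ pvSpecFrom [x] x.2 t := by
            rw [harith2, harith3, harith1]
            exact_mod_cast h2
        _ = P ++ (PySem.List.sorted R (fun y => y.1) false ++ pvSpecFrom [x] x.2 t) := by simp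

theorem pvSpecFrom_perm (T : List (String × Int)) : ∀ (R : List (String × Int)) (q : Int),
    (pvSpecFrom R q T).Perm (R ++ T) := by
  induction T with
  | nil => intro R q; simpa [pvSpecFrom] using PySem.List.sorted_perm R (fun x => x.1) false
  | cons x t ih =>
    intro R q
    by_cases h : x.2 = q
    · simpa [pvSpecFrom, h] using (ih (R ++ [x]) q).trans (by simp)
    · simpa [pvSpecFrom, h] using
        (PySem.List.sorted_perm R (fun x => x.1) false).append (ih [x] x.2)

theorem pvRun_pairwise (R : List (String × Int)) (q : Int)
    (hq : ∀ x ∈ R, x.2 = q) (hnd : (R.map Prod.fst).Nodup) :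
    (PySem.List.sorted R (fun x => x.1) false).Pairwise (fun a b => pvLexKey a < pvLexKey b) := by
  have hperm := PySem.List.sorted_perm R (fun x => x.1) false
  have h1 := PySem.List.sorted_pairwise R (fun x => x.1)
  have hnd' : ((PySem.List.sorted R (fun x => x.1) false).map Prod.fst).Nodup :=
    ((hperm.map Prod.fst).nodup_iff).mpr hnd
  have h2 : (PySem.List.sorted R (fun x => x.1) false).Pairwise (fun a b => a.1 ≠ b.1) :=
    List.pairwise_map.mp hnd'
  refine (h1.and h2).imp_of_mem ?_
  intro a b ha hb hab
  have haq : a.2 = q := hq a (hperm.mem_iff.mp ha)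
  have hbq : b.2 = q := hq b (hperm.mem_iff.mp hb)
  simp only [pvLexKey, Prod.Lex.toLex_lt_toLex]
  exact Or.inr ⟨by omega, lt_of_le_of_ne hab.1 hab.2⟩

theorem pvSpecFrom_pairwise (T : List (String × Int)) : ∀ (R : List (String × Int)) (q : Int),
    R ≠ [] → (∀ x ∈ R, x.2 = q) →
    (R ++ T).Pairwise (fun a b => b.2 ≤ a.2) →
    ((R ++ T).map Prod.fst).Nodup →
    (pvSpecFrom R q T).Pairwise (fun a b => pvLexKey a < pvLexKey b) := by
  induction T with
  | nil =>
    intro R q _ hq hdesc hnd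
    simpa [pvSpecFrom] using pvRun_pairwise R q hq (by simpa using hnd)
  | cons x t ih =>
    intro R q hne hq hdesc hnd
    by_cases h : x.2 = q
    · have hq' : ∀ y ∈ R ++ [x], y.2 = q := by
        intro y hy
        rcases List.mem_append.mp hy with hy | hy
        · exact hq y hy
        · simp at hy; subst hy; exact h
      have := ih (R ++ [x]) q (by simp) hq' (by simpa using hdesc) (by simpa using hnd)
      simpa [pvSpecFrom, h] using this
    · rw [List.pairwise_append] at hdesc
      obtain ⟨hdR, hdXT, hdCross⟩ := hdesc
      rw [List.map_append, List.nodup_append] at hnd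
      obtain ⟨hndR, hndXT, -⟩ := hnd
      obtain ⟨a0, ha0⟩ := List.exists_mem_of_ne_nil R hne
      have hxq : x.2 < q :=
        lt_of_le_of_ne (by simpa [hq a0 ha0] using hdCross a0 ha0 x (by simp)) h
      simp only [pvSpecFrom, if_neg h]
      rw [List.pairwise_append]
      refine ⟨pvRun_pairwise R q hq hndR,
        ih [x] x.2 (by simp) (by simp) (by simpa using hdXT) (by simpa using hndXT), ?_⟩
      intro a ha b hb
      have haR : a ∈ R := (PySem.List.mem_sorted _ _ _ _).mp ha
      have hbXT : b ∈ x :: t := by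
        have := (pvSpecFrom_perm t [x] x.2).mem_iff.mp hb
        simpa using this
      have hbq : b.2 < q := by
        rcases List.mem_cons.mp hbXT with hb' | hb'
        · subst hb'; exact hxq
        · exact lt_of_le_of_lt ((List.pairwise_cons.mp hdXT).1 b hb') hxq
      have haq : a.2 = q := hq a haR
      simp only [pvLexKey, Prod.Lex.toLex_lt_toLex]
      exact Or.inl (by omega)


theorem pvB_eq_sorted_lex (w : List (String × Int)) :
    sort_equal_quantities_alphabetically_alt w = PySem.List.sorted w pvLexKey false := by
  rw [PySem.List.sorted_eq_foldl_insertBy]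
  unfold sort_equal_quantities_alphabetically_alt PySem.List.sorted2
  simp only []
  congr 1
  funext a b
  congr 1
  funext u v
  show (decide (-u.2 < -v.2) || (!decide (-v.2 < -u.2) && decide (u.1 < v.1)))
      = decide (pvLexKey u < pvLexKey v)
  simp only [pvLexKey, Prod.Lex.toLex_lt_toLex]
  rcases lt_trichotomy (-u.2) (-v.2) with h | h | h
  · simp [h]
  · simp [h]
  · simp [h, not_lt_of_gt h]
    omega

-- ===== VERDICT (by name: the statement is the Claim_ definition above) =====
theorem sort_equal_quantities_alphabetically_spec : Claim_equal_sort_equal_quantities_alphabetically := by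
  intro w _ hpre
  obtain ⟨hne, hnod⟩ := hpre
  unfold Spec_sort_equal_quantities_alphabetically
  rw [pvB_eq_sorted_lex]
  have hSne : PySem.List.sorted w (fun x => x.2) true ≠ [] := by
    intro hc
    exact hne ((PySem.List.sorted_eq_nil_iff w (fun x => x.2) true).mp hc)
  obtain ⟨h, t, hS⟩ := List.exists_cons_of_ne_nil hSne
  have hperm : (PySem.List.sorted w (fun x => x.2) true).Perm w :=
    PySem.List.sorted_perm w (fun x => x.2) true
  have hpermht : (h :: t).Perm w := hS ▸ hperm
  -- A's computation equals the run-by-run spec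
  have hA : sort_equal_quantities_alphabetically w = pvSpecFrom [h] h.2 t := by
    unfold sort_equal_quantities_alphabetically
    rw [hS]
    have hget0 : PySem.List.pyGet? (h :: t) (0 : Int) = some h := by
      simp [PySem.List.pyGet?, PySem.List.pyIdx?]
    simp only []
    rw [hget0]
    have := pvLoopA t [] [h] h.2 (by simp) (by simp)
    simpa [add_comm] using this
  rw [hA]
  -- B's sort equals the same spec
  have hperm' : (pvSpecFrom [h] h.2 t).Perm w :=
    (pvSpecFrom_perm t [h] h.2).trans (by simpa using hpermht)
  have hpw : (pvSpecFrom [h] h.2 t).Pairwise (fun a b => pvLexKey a < pvLexKey b) := by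
    refine pvSpecFrom_pairwise t [h] h.2 (by simp) (by simp) ?_ ?_
    · have hd := PySem.List.sorted_pairwise_rev w (fun x => x.2)
      rw [hS] at hd
      simpa using hd
    · simp only [List.singleton_append]
      exact ((hpermht.map Prod.fst).nodup_iff).mpr hnod
  exact (PySem.List.sorted_eq_of_perm_of_pairwise_lt w (pvSpecFrom [h] h.2 t) pvLexKey hperm' hpw).symm
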